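-- pv_equiv track=rewrite | github.com/AdamZhouSE/pythonHomework | Code/CodeRecords/2930/61020/296872.py | count
-- ===== SOURCE A (Python) =====
-- def count(nums):
--     if len(nums) == 3:
--         if ((nums[0] < nums[1]) and (nums[1] > nums[2])) or (nums[0] > nums[1] and nums[1] < nums[2]):
--             return 1
--         else:
--             return 0
--
--     if len(nums) > 3:
--         return count(nums[0:3]) + count(nums[1:])
-- ===== SOURCE B (Python) =====
-- def count(nums):
--     if len(nums) < 3:
--         return None
--     return sum(1 if (a < b and b > c) or (a > b and b < c) else 0
--                for a, b, c in zip(nums, nums[1:], nums[2:]))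
-- ===== Notes on version B (the rewrite author's own statement) =====
-- stated objective: faster
-- what changed: Replaced A's recursion that slices off a 3-window and the whole tail at every step (quadratic list copying) by a single linear zip pass summing a 0/1 indicator over each interior triple.
import Mathlib
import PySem

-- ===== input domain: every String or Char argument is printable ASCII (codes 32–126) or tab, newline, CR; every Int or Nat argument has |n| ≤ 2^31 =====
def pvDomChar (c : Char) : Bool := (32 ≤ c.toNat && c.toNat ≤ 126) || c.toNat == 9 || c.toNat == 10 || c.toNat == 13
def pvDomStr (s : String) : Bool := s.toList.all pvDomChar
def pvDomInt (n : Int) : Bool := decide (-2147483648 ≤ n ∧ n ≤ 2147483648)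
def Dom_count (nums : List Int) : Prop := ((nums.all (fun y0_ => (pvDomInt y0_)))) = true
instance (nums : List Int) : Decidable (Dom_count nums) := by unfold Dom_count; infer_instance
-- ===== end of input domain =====

-- B replaces A's slice-and-recurse scheme by one linear zip pass over interior triples (same value, including None on lists shorter than 3).

-- ===== PORT A =====
def count (nums : List Int) : Option Int :=
  if nums.length = 3 then
    -- nums[0], nums[1], nums[2] are in range since length = 3; pyGet? returns some
    let n0 := (PySem.List.pyGet? nums 0).getD 0
    let n1 := (PySem.List.pyGet? nums 1).getD 0
    let n2 := (PySem.List.pyGet? nums 2).getD 0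
    if (n0 < n1 ∧ n1 > n2) ∨ (n0 > n1 ∧ n1 < n2) then some 1 else some 0
  else if h : nums.length > 3 then
    -- Python's `count(nums[0:3]) + count(nums[1:])`: both recursive calls return ints here
    match count (PySem.List.slice nums (some 0) (some 3)), count (PySem.List.slice nums (some 1) none) with
    | some x, some y => some (x + y)
    | _, _ => none
  else none
termination_by nums.length
decreasing_by
  · simp only [PySem.List.slice_zero_start, PySem.List.slice_to _ (by norm_num : (0:Int) ≤ 3)]
    simp; omega
  · simp only [PySem.List.slice_from_one]
    simp; omega

-- ===== PORT B =====
def count_alt (nums : List Int) : Option Int :=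
  if nums.length < 3 then none
  else
    some (((nums.zip (nums.drop 1)).zip (nums.drop 2)).foldl
      (fun acc t =>
        acc + (if (t.1.1 < t.1.2 ∧ t.1.2 > t.2) ∨ (t.1.1 > t.1.2 ∧ t.1.2 < t.2) then 1 else 0)) 0)

-- ===== PRECONDITION & SPEC =====
def Spec_count (nums : List Int) (out : Option Int) : Prop := out = count_alt nums
instance (nums : List Int) (out : Option Int) : Decidable (Spec_count nums out) := by unfold Spec_count; infer_instance

-- ===== CLAIM (what is proved, stated in full; the proofs are below) =====
def Claim_equal_count : Prop := ∀ (nums : List Int), Dom_count nums → Spec_count nums (count nums)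

-- ===== LEMMAS AND PROOFS =====

/-- Structural count of strict interior peaks/valleys. -/
def peaks : List Int → Int
  | a :: b :: c :: t => (if (a < b ∧ b > c) ∨ (a > b ∧ b < c) then 1 else 0) + peaks (b :: c :: t)
  | _ => 0

lemma foldl_zip_eq_peaks : ∀ (nums : List Int) (acc : Int),
    ((nums.zip (nums.drop 1)).zip (nums.drop 2)).foldl
      (fun acc t =>
        acc + (if (t.1.1 < t.1.2 ∧ t.1.2 > t.2) ∨ (t.1.1 > t.1.2 ∧ t.1.2 < t.2) then 1 else 0)) acc
      = acc + peaks nums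
  | [], _ => by simp [peaks]
  | [_], _ => by simp [peaks]
  | [_, _], _ => by simp [peaks]
  | a :: b :: c :: t, acc => by
    have ih := foldl_zip_eq_peaks (b :: c :: t)
    simp only [List.drop, List.zip_cons_cons, List.foldl_cons] at *
    rw [ih]
    simp [peaks]; ring

lemma count_eq_peaks_aux : ∀ (n : Nat) (nums : List Int), nums.length = n → 3 ≤ n →
    count nums = some (peaks nums) := by
  intro n
  induction n using Nat.strong_induction_on with
  | _ n ih =>
    intro nums hlen h3
    match nums, hlen with
    | [], hlen => simp at hlen; omega
    | [a], hlen => simp at hlen; omega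
    | [a, b], hlen => simp at hlen; omega
    | a :: b :: c :: t, hlen =>
      cases t with
      | nil =>
        simp [count, peaks, PySem.List.pyGet?, PySem.List.pyIdx?]
        split_ifs <;> rfl
      | cons d t =>
        rw [count]
        have hgt : (a :: b :: c :: d :: t).length > 3 := by simp
        rw [if_neg (by simp), dif_pos hgt]
        simp only [PySem.List.slice_zero_start, PySem.List.slice_to _ (by norm_num : (0:Int) ≤ 3),
            PySem.List.slice_from_one]
        have hn : t.length + 4 = n := by simpa using hlen
        have h1 : count ((a :: b :: c :: d :: t).take (3:Int).toNat) = some (peaks [a, b, c]) := by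
          apply ih 3 (by omega) _ (by simp) (by omega)
        have h2 : count ((a :: b :: c :: d :: t).tail) = some (peaks (b :: c :: d :: t)) := by
          apply ih (t.length + 3) (by omega) _ (by simp) (by omega)
        simp only [show ((3:Int).toNat) = 3 from rfl, List.take, List.tail] at *
        rw [h1, h2]
        simp [peaks]

lemma count_eq_peaks (nums : List Int) (h : 3 ≤ nums.length) :
    count nums = some (peaks nums) := count_eq_peaks_aux nums.length nums rfl h

-- ===== VERDICT (by name: the statement is the Claim_ definition above) =====
theorem count_spec : Claim_equal_count := by
  intro nums _
  unfold Spec_count count_alt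
  by_cases h : nums.length < 3
  · rw [if_pos h, count]
    rw [if_neg (by omega), dif_neg (by omega)]
  · rw [if_neg h, count_eq_peaks nums (by omega), foldl_zip_eq_peaks]
    simp
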